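-- pv_equiv track=rewrite | github.com/KumarAmbuj/gfg_string_palindrome | 27.next palindromic number.py | Add1
-- ===== SOURCE A (Python) =====
-- def Add1(s):
--
--     rev=s[::-1]
--     carry=0
--     l=[]
--     a=int(rev[0])+1
--     b=str(a%10)
--     l.append(str(b))
--     carry=a//10
--
--
--     if carry==0:
--         for i in range(1,len(rev)):
--             l.append(rev[i])
--         l=l[::-1]
--     if carry!=0:
--         for i in range(1,len(rev)):
--             a=int(rev[i])+carry
--             b=a%10
--             carry=a//10
--             l.append(str(b))
--         l=l[::-1]
--
--     return l
-- ===== SOURCE B (Python) =====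
-- def Add1(s):
--     chars = list(s)
--     i = len(chars) - 1
--     while i >= 0 and chars[i] == '9':
--         chars[i] = '0'
--         i -= 1
--     if i >= 0:
--         chars[i] = str(int(chars[i]) + 1)
--     return chars
-- ===== Notes on version B (the rewrite author's own statement) =====
-- stated objective: simpler
-- what changed: A reverses the string and rebuilds every digit through an int/mod/floordiv carry loop over indices; B scans the trailing nines in place, turning each into a zero and incrementing only the single stop digit, leaving the prefix untouched.
-- outside the precondition, e.g. on Add1(''): A raises IndexError, B returns []; on Add1('a19'): A raises ValueError, B returns ['a', '2', '0']; on Add1('x5a'): A raises ValueError, B raises ValueError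
-- crash fix: On the empty string A raises IndexError (B returns an empty list), and on strings ending in a nine whose rightmost non-nine character is a digit but that contain a non-digit elsewhere A raises ValueError because once it carries it int()s every character, while B returns the incremented string with the prefix copied unchanged. — e.g. on Add1("a19"): A raises ValueError, B returns ["a", "2", "0"]
import Mathlib
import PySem

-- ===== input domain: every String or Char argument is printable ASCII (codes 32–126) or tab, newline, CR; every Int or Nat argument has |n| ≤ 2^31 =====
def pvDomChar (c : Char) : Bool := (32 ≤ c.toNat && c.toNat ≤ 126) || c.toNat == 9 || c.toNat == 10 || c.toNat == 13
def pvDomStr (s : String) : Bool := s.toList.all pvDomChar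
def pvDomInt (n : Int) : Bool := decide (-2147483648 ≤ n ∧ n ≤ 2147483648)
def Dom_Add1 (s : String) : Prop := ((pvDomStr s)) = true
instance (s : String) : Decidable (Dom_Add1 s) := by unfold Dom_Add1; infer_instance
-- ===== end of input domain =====

-- B replaces A's reverse-and-rebuild carry loop by a scan that zeroes the trailing nines
-- and increments the single stop digit, leaving the prefix untouched (objective: simpler).

-- ===== PORT A =====
-- step of A's carry loop: consumes the character rev[i]
def Add1Carry (st : Option (List String × Int)) (c : Char) : Option (List String × Int) :=
  match st with
  | none => none
  | some (l, carry) =>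
    match PySem.Int.ofStr? (String.mk [c]) with
    | none => none  -- ValueError in int(rev[i])
    | some v =>
      some (l ++ [PySem.Int.toStr (PySem.Int.mod (v + carry) 10)],
            PySem.Int.floordiv (v + carry) 10)

def Add1 (s : String) : List String :=
  let rev := s.toList.reverse
  match PySem.List.pyGet? rev 0 with
  | none => []  -- IndexError on rev[0]
  | some c0 =>
    match PySem.Int.ofStr? (String.mk [c0]) with
    | none => []  -- ValueError in int(rev[0])
    | some v =>
      let a := v + 1
      let b := PySem.Int.toStr (PySem.Int.mod a 10)
      let l : List String := [b]
      let carry := PySem.Int.floordiv a 10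
      if carry = 0 then
        ((PySem.List.pyRange 1 rev.length 1).foldl
          (fun acc i => acc ++ [String.mk [PySem.List.pyGetD rev i ' ']]) l).reverse
      else
        match (PySem.List.pyRange 1 rev.length 1).foldl
            (fun st i => Add1Carry st (PySem.List.pyGetD rev i ' ')) (some (l, carry)) with
        | none => []  -- ValueError inside the loop
        | some (l, _) => l.reverse

-- ===== PORT B =====
-- B's while-loop, walking the list of 1-char strings from the right (so on the reversed
-- list): turn the leading (= trailing in s) nines into zeros, then increment the stop digit.
def Add1AltGo : List String → Option (List String)
  | [] => some []
  | c :: rest =>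
    if c = "9" then (Add1AltGo rest).map (fun r => "0" :: r)
    else
      match PySem.Int.ofStr? c with
      | none => none  -- ValueError in int(chars[i])
      | some v => some (PySem.Int.toStr (v + 1) :: rest)

def Add1_alt (s : String) : List String :=
  let chars := s.toList.map (fun c => String.mk [c])
  match Add1AltGo chars.reverse with
  | none => []
  | some r => r.reverse

-- ===== PRECONDITION & SPEC =====
def pvIsDig (c : Char) : Bool := 48 ≤ c.toNat && c.toNat ≤ 57

-- Pre_ excludes exactly the inputs on which A raises: the empty string (IndexError), a
-- non-digit last character (ValueError), and a trailing nine with a non-digit elsewhere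
-- (once it carries, A int()s every character: ValueError).
def Pre_Add1 (s : String) : Prop :=
  (match s.toList.reverse with
   | [] => false
   | c :: rest => pvIsDig c && (c ≠ '9' || rest.all pvIsDig)) = true

instance (s : String) : Decidable (Pre_Add1 s) := by unfold Pre_Add1; infer_instance

def pvWitness_Add1 : String := "129"

-- On the empty string A raises IndexError (B returns an empty list), and on strings ending
-- in a nine whose rightmost non-nine character is a digit but with a non-digit elsewhere A
-- raises ValueError, while B returns the incremented string with the prefix unchanged.
def Raises_Add1 (s : String) : Prop :=
  s = "" ∨
    (match s.toList.reverse with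
     | [] => false
     | c :: rest =>
       c = '9' && !rest.all pvIsDig &&
         (match rest.dropWhile (fun d => d = '9') with
          | [] => false
          | d :: _ => pvIsDig d)) = true

instance (s : String) : Decidable (Raises_Add1 s) := by unfold Raises_Add1; infer_instance

def pvRaiseWitness_Add1 : String := "a19"
def pvRaiseWitnessOut_Add1 : List String := ["a", "2", "0"]

def Spec_Add1 (s : String) (out : List String) : Prop := out = Add1_alt s
instance (s : String) (out : List String) : Decidable (Spec_Add1 s out) := by unfold Spec_Add1; infer_instance

-- ===== CLAIM (what is proved, stated in full; the proofs are below) =====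
def Claim_equal_Add1 : Prop := ∀ (s : String), Dom_Add1 s → Pre_Add1 s → Spec_Add1 s (Add1 s)
def Claim_raises_Add1 : Prop := (∀ (s : String), Dom_Add1 s → Raises_Add1 s → ¬ Pre_Add1 s) ∧ (Dom_Add1 (pvRaiseWitness_Add1) ∧ Raises_Add1 (pvRaiseWitness_Add1) ∧ Add1_alt (pvRaiseWitness_Add1) = pvRaiseWitnessOut_Add1)

-- ===== LEMMAS AND PROOFS =====

lemma toList_mk (l : List Char) : (String.mk l).toList = l := Eq.symm (String.ofList_eq.mp rfl)

lemma char_eq_of_toNat_eq {a b : Char} (h : a.toNat = b.toNat) : a = b := by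
  apply Char.ext
  exact UInt32.toNat_inj.mp h

lemma digit_eq (c : Char) (h1 : 48 ≤ c.toNat) (h2 : c.toNat ≤ 57) :
    c = '0' ∨ c = '1' ∨ c = '2' ∨ c = '3' ∨ c = '4' ∨ c = '5' ∨ c = '6' ∨ c = '7' ∨ c = '8' ∨ c = '9' := by
  have h : c.toNat = 48 ∨ c.toNat = 49 ∨ c.toNat = 50 ∨ c.toNat = 51 ∨ c.toNat = 52 ∨
      c.toNat = 53 ∨ c.toNat = 54 ∨ c.toNat = 55 ∨ c.toNat = 56 ∨ c.toNat = 57 := by omega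
  rcases h with h|h|h|h|h|h|h|h|h|h
  · exact Or.inl (char_eq_of_toNat_eq (h.trans (by decide : (48:Nat) = '0'.toNat)))
  · exact Or.inr (Or.inl (char_eq_of_toNat_eq (h.trans (by decide : (49:Nat) = '1'.toNat))))
  · exact Or.inr (Or.inr (Or.inl (char_eq_of_toNat_eq (h.trans (by decide : (50:Nat) = '2'.toNat)))))
  · exact Or.inr (Or.inr (Or.inr (Or.inl (char_eq_of_toNat_eq (h.trans (by decide : (51:Nat) = '3'.toNat))))))
  · exact Or.inr (Or.inr (Or.inr (Or.inr (Or.inl (char_eq_of_toNat_eq (h.trans (by decide : (52:Nat) = '4'.toNat)))))))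
  · exact Or.inr (Or.inr (Or.inr (Or.inr (Or.inr (Or.inl (char_eq_of_toNat_eq (h.trans (by decide : (53:Nat) = '5'.toNat))))))))
  · exact Or.inr (Or.inr (Or.inr (Or.inr (Or.inr (Or.inr (Or.inl (char_eq_of_toNat_eq (h.trans (by decide : (54:Nat) = '6'.toNat)))))))))
  · exact Or.inr (Or.inr (Or.inr (Or.inr (Or.inr (Or.inr (Or.inr (Or.inl (char_eq_of_toNat_eq (h.trans (by decide : (55:Nat) = '7'.toNat))))))))))
  · exact Or.inr (Or.inr (Or.inr (Or.inr (Or.inr (Or.inr (Or.inr (Or.inr (Or.inl (char_eq_of_toNat_eq (h.trans (by decide : (56:Nat) = '8'.toNat)))))))))))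
  · exact Or.inr (Or.inr (Or.inr (Or.inr (Or.inr (Or.inr (Or.inr (Or.inr (Or.inr ((char_eq_of_toNat_eq (h.trans (by decide : (57:Nat) = '9'.toNat))))))))))))

lemma ofStr_digit (c : Char) (h1 : 48 ≤ c.toNat) (h2 : c.toNat ≤ 57) :
    PySem.Int.ofStr? (String.mk [c]) = some ((c.toNat : Int) - 48) := by
  rcases digit_eq c h1 h2 with rfl|rfl|rfl|rfl|rfl|rfl|rfl|rfl|rfl|rfl <;> decide

lemma toStr_digit (c : Char) (h1 : 48 ≤ c.toNat) (h2 : c.toNat ≤ 57) :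
    PySem.Int.toStr ((c.toNat : Int) - 48) = String.mk [c] := by
  rcases digit_eq c h1 h2 with rfl|rfl|rfl|rfl|rfl|rfl|rfl|rfl|rfl|rfl <;> decide

lemma mk_eq_nine (c : Char) : String.mk [c] = "9" ↔ c = '9' := by
  constructor
  · intro h
    have h2 := congrArg String.toList h
    rw [toList_mk] at h2
    simpa using h2
  · intro h; subst h; rfl

-- bridge: the index loop 'for i in range(pre.length, len(xs))' over xs = pre ++ rest is a fold over rest
lemma foldl_pyRange_getD {α β : Type} (g : β → α → β) (d : α) :
    ∀ (rest pre : List α) (a : β),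
    (PySem.List.pyRange (pre.length : Int) ((pre.length : Int) + (rest.length : Int)) 1).foldl
      (fun acc i => g acc (PySem.List.pyGetD (pre ++ rest) i d)) a
    = rest.foldl g a := by
  intro rest
  induction rest with
  | nil =>
    intro pre a
    rw [PySem.List.pyRange_one_eq_nil (by simp)]
    rfl
  | cons x t ih =>
    intro pre a
    rw [PySem.List.pyRange_one_cons (by push_cast [List.length_cons]; omega)]
    simp only [List.foldl_cons]
    have hx : PySem.List.pyGetD (pre ++ x :: t) (pre.length : Int) d = x := by
      rw [PySem.List.pyGetD_natCast]
      simp [List.getD]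
    rw [hx]
    have h := ih (pre ++ [x]) (g a x)
    have hlen : ((pre ++ [x]).length : Int) = (pre.length : Int) + 1 := by
      push_cast [List.length_append, List.length_cons, List.length_nil]; omega
    rw [hlen, List.append_assoc] at h
    have harith : (pre.length : Int) + 1 + (t.length : Int) = (pre.length : Int) + ((x :: t).length : Int) := by
      push_cast [List.length_cons]; omega
    rw [harith] at h
    simpa using h

-- A's carry loop once the carry has become 0 just copies the digits
lemma carry_zero (t : List Char) (ht : ∀ c ∈ t, pvIsDig c = true) :
    ∀ acc : List String,
      t.foldl Add1Carry (some (acc, 0)) = some (acc ++ t.map (fun c => String.mk [c]), 0) := by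
  induction t with
  | nil => intro acc; simp
  | cons c t ih =>
    intro acc
    have hc : 48 ≤ c.toNat ∧ c.toNat ≤ 57 := by simpa [pvIsDig] using ht c (by simp)
    have hstep : Add1Carry (some (acc, 0)) c = some (acc ++ [String.mk [c]], 0) := by
      simp only [Add1Carry, ofStr_digit c hc.1 hc.2]
      have hm : PySem.Int.mod ((c.toNat : Int) - 48 + 0) 10 = (c.toNat : Int) - 48 := by
        rw [PySem.Int.mod_eq_emod_of_pos (by norm_num)]; omega
      have hd : PySem.Int.floordiv ((c.toNat : Int) - 48 + 0) 10 = 0 := by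
        rw [PySem.Int.floordiv_eq_ediv_of_pos (by norm_num)]; omega
      rw [hm, hd, toStr_digit c hc.1 hc.2]
    rw [List.foldl_cons, hstep, ih (fun d hd => ht d (by simp [hd]))]
    simp

-- A's carry loop started with carry 1 computes what B's while loop computes
lemma carry_one (t : List Char) (ht : ∀ c ∈ t, pvIsDig c = true) :
    ∃ r c', (∀ acc : List String, t.foldl Add1Carry (some (acc, 1)) = some (acc ++ r, c')) ∧
      Add1AltGo (t.map (fun c => String.mk [c])) = some r := by
  induction t with
  | nil => exact ⟨[], 1, fun acc => by simp, rfl⟩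
  | cons c t ih =>
    have hc : 48 ≤ c.toNat ∧ c.toNat ≤ 57 := by simpa [pvIsDig] using ht c (by simp)
    by_cases h9 : c = '9'
    · subst h9
      obtain ⟨r, c', hfold, hgo⟩ := ih (fun d hd => ht d (by simp [hd]))
      refine ⟨"0" :: r, c', ?_, ?_⟩
      · intro acc
        have hstep : Add1Carry (some (acc, 1)) '9' = some (acc ++ ["0"], 1) := by
          simp only [Add1Carry, show PySem.Int.ofStr? (String.mk ['9']) = some 9 from by decide,
            show PySem.Int.mod (9 + 1) 10 = 0 from by decide,
            show PySem.Int.floordiv (9 + 1) 10 = 1 from by decide,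
            show PySem.Int.toStr 0 = "0" from by decide]
        rw [List.foldl_cons, hstep, hfold]
        simp
      · simp only [List.map_cons, Add1AltGo]
        rw [if_pos (show (String.mk ['9'] : String) = "9" from rfl), hgo]
        rfl
    · have h2' : c.toNat ≤ 56 := by
        rcases Nat.lt_or_ge c.toNat 57 with h | h
        · omega
        · exact absurd (char_eq_of_toNat_eq
            ((by omega : c.toNat = 57).trans (by decide : (57:Nat) = '9'.toNat))) h9
      refine ⟨PySem.Int.toStr ((c.toNat : Int) - 48 + 1) :: t.map (fun c => String.mk [c]), 0, ?_, ?_⟩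
      · intro acc
        have hstep : Add1Carry (some (acc, 1)) c
            = some (acc ++ [PySem.Int.toStr ((c.toNat : Int) - 48 + 1)], 0) := by
          simp only [Add1Carry, ofStr_digit c hc.1 hc.2]
          have hm : PySem.Int.mod ((c.toNat : Int) - 48 + 1) 10 = (c.toNat : Int) - 48 + 1 := by
            rw [PySem.Int.mod_eq_emod_of_pos (by norm_num)]; omega
          have hd : PySem.Int.floordiv ((c.toNat : Int) - 48 + 1) 10 = 0 := by
            rw [PySem.Int.floordiv_eq_ediv_of_pos (by norm_num)]; omega
          rw [hm, hd]
        rw [List.foldl_cons, hstep, carry_zero t (fun d hd => ht d (by simp [hd]))]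
        simp
      · simp only [List.map_cons, Add1AltGo]
        rw [if_neg (by simpa [mk_eq_nine] using h9), ofStr_digit c hc.1 hc.2]

-- the copy loop of the carry-0 branch is a map
lemma foldl_append_single (t : List Char) :
    ∀ acc : List String,
      t.foldl (fun acc c => acc ++ [String.mk [c]]) acc = acc ++ t.map (fun c => String.mk [c]) := by
  induction t with
  | nil => intro acc; simp
  | cons c t ih => intro acc; simp [ih]

lemma bridge_carry (x : Char) (t : List Char) (a : Option (List String × Int)) :
    (PySem.List.pyRange 1 (((x :: t).length : Nat) : Int) 1).foldl
      (fun st i => Add1Carry st (PySem.List.pyGetD (x :: t) i ' ')) a = t.foldl Add1Carry a := by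
  have h := foldl_pyRange_getD Add1Carry ' ' t [x] a
  simp only [List.length_singleton, Nat.cast_one, List.singleton_append] at h
  rw [show (1:Int) + (t.length : Int) = (((x :: t).length : Nat) : Int) from by
    push_cast [List.length_cons]; omega] at h
  exact h

lemma bridge_copy (x : Char) (t : List Char) (a : List String) :
    (PySem.List.pyRange 1 (((x :: t).length : Nat) : Int) 1).foldl
      (fun acc i => acc ++ [String.mk [PySem.List.pyGetD (x :: t) i ' ']]) a
      = t.foldl (fun acc c => acc ++ [String.mk [c]]) a := by
  have h := foldl_pyRange_getD (fun (acc : List String) c => acc ++ [String.mk [c]]) ' ' t [x] a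
  simp only [List.length_singleton, Nat.cast_one, List.singleton_append] at h
  rw [show (1:Int) + (t.length : Int) = (((x :: t).length : Nat) : Int) from by
    push_cast [List.length_cons]; omega] at h
  exact h

-- ===== VERDICT (by name: the statement is the Claim_ definition above) =====
theorem Add1_spec : Claim_equal_Add1 := by
  intro s _ hpre
  unfold Spec_Add1 Add1 Add1_alt
  unfold Pre_Add1 at hpre
  rcases hrev : s.toList.reverse with _ | ⟨c0, rest⟩
  · rw [hrev] at hpre; simp at hpre
  · rw [hrev] at hpre
    simp only [Bool.and_eq_true, Bool.or_eq_true] at hpre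
    have hc : 48 ≤ c0.toNat ∧ c0.toNat ≤ 57 := by simpa [pvIsDig] using hpre.1
    simp only [← List.map_reverse, hrev, List.map_cons,
      PySem.List.pyGet?_zero_cons, ofStr_digit c0 hc.1 hc.2]
    by_cases h9 : c0 = '9'
    · subst h9
      have hdig : ∀ c ∈ rest, pvIsDig c = true := by
        rcases hpre.2 with h | h
        · simp at h
        · simpa [List.all_eq_true] using h
      obtain ⟨r, c', hfold, hgo⟩ := carry_one rest hdig
      have hnum : (('9'.toNat : Int) - 48 + 1) = 10 := by decide
      rw [hnum,
        show PySem.Int.mod 10 10 = 0 from by decide,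
        show PySem.Int.floordiv 10 10 = 1 from by decide]
      rw [if_neg (by norm_num)]
      rw [bridge_carry, hfold]
      simp only [Add1AltGo]
      rw [if_pos (show (String.mk ['9'] : String) = "9" from rfl), hgo]
      simp [show PySem.Int.toStr 0 = "0" from by decide]
    · have h2' : c0.toNat ≤ 56 := by
        rcases Nat.lt_or_ge c0.toNat 57 with h | h
        · omega
        · exact absurd (char_eq_of_toNat_eq
            ((by omega : c0.toNat = 57).trans (by decide : (57:Nat) = '9'.toNat))) h9
      have hm : PySem.Int.mod ((c0.toNat : Int) - 48 + 1) 10 = (c0.toNat : Int) - 48 + 1 := by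
        rw [PySem.Int.mod_eq_emod_of_pos (by norm_num)]; omega
      have hd : PySem.Int.floordiv ((c0.toNat : Int) - 48 + 1) 10 = 0 := by
        rw [PySem.Int.floordiv_eq_ediv_of_pos (by norm_num)]; omega
      rw [hm, hd, if_pos rfl]
      rw [bridge_copy, foldl_append_single]
      simp only [Add1AltGo]
      rw [if_neg (by simpa [mk_eq_nine] using h9), ofStr_digit c0 hc.1 hc.2]
      simp

@[simp] theorem Add1_raises : Claim_raises_Add1 := by
  unfold Claim_raises_Add1
  constructor
  · intro s _ hr
    unfold Raises_Add1 at hr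
    unfold Pre_Add1
    rcases hr with rfl | hr
    · decide
    · intro hpre
      rcases hrev : s.toList.reverse with _ | ⟨c, rest⟩
      · rw [hrev] at hr; simp at hr
      · rw [hrev] at hr hpre
        simp only [Bool.and_eq_true, decide_eq_true_eq] at hr
        obtain ⟨⟨hc9, hnall⟩, _⟩ := hr
        subst hc9
        simp only [Bool.and_eq_true, Bool.or_eq_true] at hpre
        rcases hpre.2 with h | h
        · simp at h
        · rw [h] at hnall; simp at hnall
  · exact ⟨by decide, by decide, by decide⟩
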